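-- pv_equiv track=rewrite | github.com/AryanBogam/Python-Challenge | day_65/problem_10/solution.py | find_max_sum_row
-- ===== SOURCE A (Python) =====
-- def find_max_sum_row(matrix):
--     max_sum = 0
--     max_row_index = 0
--
--     for i in range(len(matrix)):
--         row_sum = 0
--         for num in matrix[i]:
--             row_sum += num
--
--         if i == 0 or row_sum > max_sum:
--             max_sum = row_sum
--             max_row_index = i
--
--     return max_row_index
-- ===== SOURCE B (Python) =====
-- def find_max_sum_row(matrix):
--     order = sorted(enumerate(matrix), key=lambda p: -sum(p[1]))
--     if not order:
--         return 0
--     return order[0][0]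
-- ===== Notes on version B (the rewrite author's own statement) =====
-- stated objective: alternative
-- what changed: Replaces A's single-pass running-max index loop by a sort-based argmax: stably sort the enumerated rows by descending row sum and return the first entry's index (stability reproduces A's first-max tie-breaking; empty matrix gives an empty order, hence 0 like A).
import Mathlib
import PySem

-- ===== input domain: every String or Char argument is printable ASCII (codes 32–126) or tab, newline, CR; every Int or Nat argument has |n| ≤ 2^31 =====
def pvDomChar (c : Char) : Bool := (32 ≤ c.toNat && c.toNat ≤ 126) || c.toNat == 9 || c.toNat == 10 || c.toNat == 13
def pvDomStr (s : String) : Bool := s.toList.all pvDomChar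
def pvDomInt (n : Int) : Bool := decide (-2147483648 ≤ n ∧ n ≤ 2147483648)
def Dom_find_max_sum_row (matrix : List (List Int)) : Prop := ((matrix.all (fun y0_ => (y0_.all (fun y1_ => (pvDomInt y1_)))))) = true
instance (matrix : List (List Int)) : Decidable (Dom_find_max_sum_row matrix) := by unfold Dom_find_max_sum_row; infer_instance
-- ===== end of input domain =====

-- B replaces A's running-max index loop by a sort-based argmax: stably sort the
-- enumerated rows by descending row sum and take the first entry's index; objective: alternative.

-- ===== PORT A =====
def find_max_sum_row (matrix : List (List Int)) : Int :=
  -- max_sum = 0; max_row_index = 0; for i in range(len(matrix)): ...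
  let st :=
    (PySem.List.pyRange 0 (matrix.length : Int) 1).foldl
      (fun (st : Int × Int) i =>
        -- row_sum = 0; for num in matrix[i]: row_sum += num   (i is always in range)
        let row_sum := (PySem.List.pyGetD matrix i []).foldl (fun a b => a + b) 0
        if i == 0 || row_sum > st.1 then (row_sum, i) else st)
      (0, 0)
  st.2

-- ===== PORT B =====
def find_max_sum_row_alt (matrix : List (List Int)) : Int :=
  -- order = sorted(enumerate(matrix), key=lambda p: -sum(p[1]))
  let order := PySem.List.sorted (PySem.List.enumerate matrix) (fun p => -(p.2.sum))
  match order with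
  | [] => 0                 -- if not order: return 0
  | p :: _ => p.1           -- return order[0][0]

-- ===== PRECONDITION & SPEC =====
def Spec_find_max_sum_row (matrix : List (List Int)) (out : Int) : Prop := out = find_max_sum_row_alt matrix
instance (matrix : List (List Int)) (out : Int) : Decidable (Spec_find_max_sum_row matrix out) := by unfold Spec_find_max_sum_row; infer_instance

-- ===== CLAIM (what is proved, stated in full; the proofs are below) =====
def Claim_equal_find_max_sum_row : Prop := ∀ (matrix : List (List Int)), Dom_find_max_sum_row matrix → Spec_find_max_sum_row matrix (find_max_sum_row matrix)

-- ===== LEMMAS AND PROOFS =====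

-- A's loop from index 1 on, abstracted over the list of remaining row sums
def runA (st : Int × Int) (k : Int) (xs : List Int) : Int × Int :=
  match xs with
  | [] => st
  | x :: t => runA (if x > st.1 then (x, k) else st) (k + 1) t

-- A's fold over range(a, len(matrix)) equals runA over the row sums of the dropped suffix (for a ≥ 1)
theorem foldA_eq_runA (matrix : List (List Int)) (a : Nat) (st : Int × Int) (ha : 1 ≤ a) :
    (PySem.List.pyRange (a : Int) (matrix.length : Int) 1).foldl
        (fun (st : Int × Int) i =>
          if i == 0 || (PySem.List.pyGetD matrix i []).foldl (fun a b => a + b) 0 > st.1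
          then ((PySem.List.pyGetD matrix i []).foldl (fun a b => a + b) 0, i) else st)
        st
      = runA st (a : Int) ((matrix.drop a).map (fun r => r.foldl (fun a b => a + b) 0)) := by
  by_cases h : a < matrix.length
  · rw [PySem.List.pyRange_one_cons (by exact_mod_cast h)]
    simp only [List.foldl_cons]
    rw [PySem.List.pyGetD_ofNat matrix a [] h]
    have hdrop : matrix.drop a = matrix[a] :: matrix.drop (a + 1) :=
      List.drop_eq_getElem_cons h
    rw [hdrop]
    simp only [List.map_cons, runA]
    have hne : ((a : Int) == 0) = false := by
      simp; omega
    rw [hne]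
    simp only [Bool.false_or]
    have hcast : (a : Int) + 1 = ((a + 1 : Nat) : Int) := by push_cast; ring
    rw [hcast, foldA_eq_runA matrix (a + 1) _ (by omega)]
    by_cases hc : matrix[a].foldl (fun a b => a + b) 0 > st.1
    · rw [if_pos (by simpa using hc), if_pos hc]
    · rw [if_neg (by simpa using hc), if_neg hc]
  · rw [PySem.List.pyRange_one_eq_nil (by exact_mod_cast Nat.le_of_not_lt h)]
    rw [List.drop_eq_nil_of_le (Nat.le_of_not_lt h)]
    simp [runA]
termination_by matrix.length - a

-- The head of insertion into a nonempty list is the 'if before' choice of the two heads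
theorem head_insertBy {α : Type} (before : α → α → Bool) (x h : α) (t : List α) :
    ∃ t', PySem.List.insertBy before x (h :: t) = (if before x h then x else h) :: t' := by
  by_cases hb : before x h
  · exact ⟨h :: t, by simp [PySem.List.insertBy, hb]⟩
  · exact ⟨PySem.List.insertBy before x t, by simp [PySem.List.insertBy, hb]⟩

-- The head of the insertion-sort fold is the running 'first strict minimum' of the inputs
theorem head_foldl_insertBy {α : Type} (before : α → α → Bool) (xs : List α) (h : α) (t : List α) :
    ∃ t', xs.foldl (fun acc x => PySem.List.insertBy before x acc) (h :: t)
        = (xs.foldl (fun c x => if before x c then x else c) h) :: t' := by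
  induction xs generalizing h t with
  | nil => exact ⟨t, rfl⟩
  | cons x xs ih =>
    simp only [List.foldl_cons]
    obtain ⟨t', ht'⟩ := head_insertBy before x h t
    rw [ht']
    exact ih _ t'

-- A's loop state corresponds to the running minimum of the key -sum over the enumerated rows
theorem runA_eq_enumFold (rows : List (List Int)) (h : Int × List Int) (k : Int) :
    runA (h.2.sum, h.1) k (rows.map (fun r => r.sum)) =
      (((PySem.List.enumerate rows k).foldl
          (fun c y => if decide (-(y.2.sum) < -(c.2.sum)) then y else c) h).2.sum,
       ((PySem.List.enumerate rows k).foldl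
          (fun c y => if decide (-(y.2.sum) < -(c.2.sum)) then y else c) h).1) := by
  induction rows generalizing h k with
  | nil => simp [runA, PySem.List.enumerate]
  | cons r rest ih =>
    rw [PySem.List.enumerate_cons]
    simp only [List.map_cons, runA, List.foldl_cons]
    by_cases hc : r.sum > h.2.sum
    · rw [if_pos hc, if_pos (by simp; omega)]
      exact ih (k, r) (k + 1)
    · rw [if_neg hc, if_neg (by simp; omega)]
      exact ih h (k + 1)

-- ===== VERDICT (by name: the statement is the Claim_ definition above) =====
theorem find_max_sum_row_spec : Claim_equal_find_max_sum_row := by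
  intro matrix _
  unfold Spec_find_max_sum_row find_max_sum_row find_max_sum_row_alt
  match matrix with
  | [] => simp [PySem.List.pyRange_one_eq_nil, PySem.List.enumerate, PySem.List.sorted]
  | r :: rs =>
    -- A's side: peel off i = 0, then rewrite the remaining range fold as runA
    simp only [List.length_cons]
    have h0 : (0 : Int) < ((rs.length + 1 : Nat) : Int) := by positivity
    rw [PySem.List.pyRange_one_cons h0]
    simp only [List.foldl_cons, PySem.List.pyGetD_zero_cons]
    rw [if_pos (by simp)]
    have hfold := foldA_eq_runA (r :: rs) 1 (r.foldl (fun a b => a + b) 0, 0) (le_refl 1)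
    simp only [List.length_cons, Nat.cast_one] at hfold
    rw [show (0 : Int) + 1 = 1 by norm_num, hfold]
    simp only [List.drop_succ_cons, List.drop_zero]
    -- B's side: the head of the stable sort is the running minimum of the key
    rw [PySem.List.sorted_eq_foldl_insertBy, PySem.List.enumerate_cons, List.foldl_cons]
    have hins : PySem.List.insertBy
        (fun a b : Int × List Int => decide (-(a.2.sum) < -(b.2.sum))) (0, r) [] = [(0, r)] := rfl
    rw [hins]
    obtain ⟨t', ht'⟩ := head_foldl_insertBy
      (fun a b : Int × List Int => decide (-(a.2.sum) < -(b.2.sum)))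
      (PySem.List.enumerate rs (0 + 1)) (0, r) []
    simp only [zero_add] at ht' ⊢
    rw [ht']
    -- connect A's runA with B's running minimum
    have hsum : ∀ l : List Int, l.foldl (fun a b => a + b) 0 = l.sum := by
      intro l; rw [List.sum_eq_foldl]
    simp only [hsum]
    have hkey := runA_eq_enumFold rs ((0 : Int), r) 1
    simp only at hkey
    rw [hkey]
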